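-- pv_equiv track=rewrite | github.com/PHoltzman/interactive-christmas | LightSender.py | determine_L_vals
-- ===== SOURCE A (Python) =====
-- def determine_L_vals(L, num_active):
-- 	# first determine the allocation size for each
-- 	new_L = int(L / num_active)
-- 	L_array = [new_L] * num_active
-- 	add_ind = 0
-- 	while sum(L_array) < L:
-- 		L_array[add_ind] += 1
-- 		add_ind += 1
--
-- 	# now generate the actual cutoff points for each
-- 	L_ranges = []
-- 	for i, val in enumerate(L_array):
-- 		L_ranges.append((sum(L_array[:i]), sum(L_array[:i+1])-1))
--
-- 	return L_ranges
-- ===== SOURCE B (Python) =====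
-- def determine_L_vals(L, num_active):
--     # Compute the chunk size once (truncating quotient) and the number of
--     # oversized chunks, then emit the ranges in one pass with a running start.
--     q = int(L / num_active)
--     extra = L - q * num_active
--     ranges = []
--     start = 0
--     for i in range(num_active):
--         size = q + 1 if i < extra else q
--         ranges.append((start, start + size - 1))
--         start += size
--     return ranges
-- ===== Notes on version B (the rewrite author's own statement) =====
-- stated objective: faster
-- what changed: A recomputes sum(L_array[:i]) for every chunk and fills the remainder by a unit-increment loop (quadratic overall); B computes the quotient and remainder once and emits the ranges in a single pass with a running start. Pre_ excludes only the inputs where A raises (num_active = 0: ZeroDivisionError; num_active < 0 with L > 0: IndexError).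
import Mathlib
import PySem

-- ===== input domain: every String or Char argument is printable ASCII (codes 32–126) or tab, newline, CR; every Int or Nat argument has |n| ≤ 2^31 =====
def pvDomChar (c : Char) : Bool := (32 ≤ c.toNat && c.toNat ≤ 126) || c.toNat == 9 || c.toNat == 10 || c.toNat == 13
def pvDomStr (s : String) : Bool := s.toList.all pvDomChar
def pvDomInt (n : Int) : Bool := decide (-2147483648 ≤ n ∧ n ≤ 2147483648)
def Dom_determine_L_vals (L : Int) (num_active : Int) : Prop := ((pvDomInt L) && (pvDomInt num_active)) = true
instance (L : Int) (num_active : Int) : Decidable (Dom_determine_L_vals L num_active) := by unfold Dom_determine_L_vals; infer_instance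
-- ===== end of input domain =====

-- B replaces A's quadratic loop of repeated prefix sums by a single pass with a
-- running start and the remainder computed arithmetically (objective: faster).

-- ===== PORT A =====
-- A's while-loop 'while sum(L_array) < L: L_array[add_ind] += 1; add_ind += 1'.
-- The dependent guard models Python's index check; when add_ind reaches the end with
-- sum still < L Python raises IndexError — such inputs are excluded by Pre_.
-- (the Nat fuel only makes the recursion structural: with fuel = length+1 it is never
-- exhausted, since each iteration advances add_ind and add_ind = length stops the loop)
def pvAIncr (L : Int) : Nat → List Int → Nat → List Int
  | 0, arr, _ => arr
  | fuel + 1, arr, add_ind =>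
    if arr.sum < L then
      if h : add_ind < arr.length then
        pvAIncr L fuel (arr.set add_ind (arr[add_ind] + 1)) (add_ind + 1)
      else arr   -- IndexError in Python; outside Pre_
    else arr

def determine_L_vals (L : Int) (num_active : Int) : List (Int × Int) :=
  -- int(L / num_active): exact as truncating division since |L|,|num_active| ≤ 2^31 < 2^53
  let new_L := PySem.Int.truncdiv L num_active
  let L_array := PySem.List.pyRepeat [new_L] num_active
  let arr := pvAIncr L (L_array.length + 1) L_array 0
  (PySem.List.enumerate arr 0).foldl (fun acc p =>
    acc ++ [((PySem.List.slice arr none (some p.1)).sum,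
             (PySem.List.slice arr none (some (p.1 + 1))).sum - 1)]) []

-- ===== PORT B =====
def determine_L_vals_alt (L : Int) (num_active : Int) : List (Int × Int) :=
  -- int(L / num_active): exact as truncating division since |L|,|num_active| ≤ 2^31 < 2^53
  let q := PySem.Int.truncdiv L num_active
  let extra := L - q * num_active
  ((PySem.List.pyRange 0 num_active 1).foldl
    (fun (p : List (Int × Int) × Int) i =>
      (p.1 ++ [(p.2, p.2 + (if i < extra then q + 1 else q) - 1)],
       p.2 + (if i < extra then q + 1 else q))) ([], 0)).1

-- ===== PRECONDITION & SPEC =====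
-- A raises ZeroDivisionError for num_active = 0 and IndexError for num_active ≤ -1 with L ≥ 1;
-- on every other input it returns normally, and Pre_ admits all of those inputs.
def Pre_determine_L_vals (L : Int) (num_active : Int) : Prop :=
  1 ≤ num_active ∨ (num_active ≤ -1 ∧ L ≤ 0)
instance (L : Int) (num_active : Int) : Decidable (Pre_determine_L_vals L num_active) := by
  unfold Pre_determine_L_vals; infer_instance
def pvWitness_determine_L_vals : Int × Int := (7, 3)

def Spec_determine_L_vals (L : Int) (num_active : Int) (out : List (Int × Int)) : Prop :=
  out = determine_L_vals_alt L num_active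
instance (L : Int) (num_active : Int) (out : List (Int × Int)) : Decidable (Spec_determine_L_vals L num_active out) := by
  unfold Spec_determine_L_vals; infer_instance

-- ===== CLAIM (what is proved, stated in full; the proofs are below) =====
def Claim_equal_determine_L_vals : Prop := ∀ (L : Int) (num_active : Int), Dom_determine_L_vals L num_active → Pre_determine_L_vals L num_active → Spec_determine_L_vals L num_active (determine_L_vals L num_active)
-- ===== LEMMAS AND PROOFS =====

/-- Closed-form prefix sum of the partition sizes: `k` chunks cover `k*q + min k r` cells. -/
def pvF (q r : Int) (k : Nat) : Int := k * q + min (k : Int) r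

/-- The (clamped) remainder both programs distribute over the first chunks. -/
def pvR (L : Int) (num_active : Int) : Int :=
  max (L - num_active * PySem.Int.truncdiv L num_active) 0

lemma pv_sum_mix (q : Int) (a b : Nat) :
    (List.replicate a (q + 1) ++ List.replicate b q).sum = ((a : Int) + (b : Int)) * q + a := by
  simp [List.sum_replicate]; ring

lemma pv_loop (L q : Int) (n r : Nat) (hrn : r ≤ n)
    (hstop : L ≤ (n : Int) * q + r) (hexact : (r : Int) + n * q = L ∨ r = 0) :
    ∀ j, j ≤ r → ∀ fuel, n - j < fuel →
    pvAIncr L fuel (List.replicate j (q + 1) ++ List.replicate (n - j) q) j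
      = List.replicate r (q + 1) ++ List.replicate (n - r) q := by
  intro j hj
  induction hd : r - j generalizing j with
  | zero =>
    intro fuel hfuel
    obtain ⟨f, rfl⟩ : ∃ f, fuel = f + 1 := ⟨fuel - 1, by omega⟩
    have hjr : j = r := by omega
    subst hjr
    have hcond : ¬ ((List.replicate j (q + 1) ++ List.replicate (n - j) q).sum < L) := by
      rw [pv_sum_mix]
      have hc : ((j : Int) + ((n - j : Nat) : Int)) = (n : Int) := by omega
      rw [hc]; omega
    simp only [pvAIncr]
    rw [if_neg hcond]
  | succ m ih =>
    intro fuel hfuel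
    obtain ⟨f, rfl⟩ : ∃ f, fuel = f + 1 := ⟨fuel - 1, by omega⟩
    have hjr : j < r := by omega
    have hex : (r : Int) + n * q = L := by
      rcases hexact with h | h
      · exact h
      · omega
    have hcond : (List.replicate j (q + 1) ++ List.replicate (n - j) q).sum < L := by
      rw [pv_sum_mix]
      have hc : ((j : Int) + ((n - j : Nat) : Int)) = (n : Int) := by omega
      rw [hc]; omega
    have hlen : j < (List.replicate j (q + 1) ++ List.replicate (n - j) q).length := by
      simp; omega
    simp only [pvAIncr]
    rw [if_pos hcond, dif_pos hlen]
    have hget : (List.replicate j (q + 1) ++ List.replicate (n - j) q)[j]'hlen = q := by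
      simp
    have hset : (List.replicate j (q + 1) ++ List.replicate (n - j) q).set j
          ((List.replicate j (q + 1) ++ List.replicate (n - j) q)[j]'hlen + 1)
        = List.replicate (j + 1) (q + 1) ++ List.replicate (n - (j + 1)) q := by
      rw [hget, List.set_append]
      rw [List.length_replicate, if_neg (lt_irrefl j), Nat.sub_self]
      rw [show n - j = (n - (j + 1)) + 1 from by omega, List.replicate_succ, List.set_cons_zero]
      rw [List.replicate_succ']
      simp
    rw [hset]
    exact ih (j + 1) (by omega) (by omega) f (by omega)

lemma pv_sum_take_mix (q : Int) (r n k : Nat) (hrn : r ≤ n) (hk : k ≤ n) :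
    ((List.replicate r (q + 1) ++ List.replicate (n - r) q).take k).sum = pvF q (r : Int) k := by
  rw [List.take_append, List.take_replicate, List.take_replicate]
  simp only [List.sum_append, List.sum_replicate, nsmul_eq_mul, List.length_replicate, pvF]
  have hmin : min ((k : Int)) ((r : Int)) = ((min k r : Nat) : Int) := by omega
  rw [hmin]
  have h2 : ((min (k - r) (n - r) : Nat) : Int) = (k : Int) - ((min k r : Nat) : Int) := by omega
  rw [h2]
  ring

/-- A's result in closed form, for 1 ≤ num_active. -/
lemma pv_A_closed (L : Int) (num_active : Int) (h1 : 1 ≤ num_active) :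
    determine_L_vals L num_active
      = (List.range num_active.toNat).map
          (fun k => (pvF (PySem.Int.truncdiv L num_active) (pvR L num_active) k,
                     pvF (PySem.Int.truncdiv L num_active) (pvR L num_active) (k + 1) - 1)) := by
  simp only [determine_L_vals]
  rw [PySem.List.pyRepeat_singleton]
  set q := PySem.Int.truncdiv L num_active with hqdef
  set n := num_active.toNat with hndef
  have hn : ((n : Nat) : Int) = num_active := Int.toNat_of_nonneg (by omega)
  have htd : q = L.tdiv num_active := by rw [hqdef]; simp [PySem.Int.truncdiv]
  have hid : num_active * q + L.tmod num_active = L := by rw [htd]; exact Int.mul_tdiv_add_tmod L num_active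
  have hlt : L.tmod num_active < num_active := Int.tmod_lt_of_pos L (by omega)
  set r : Nat := (L - num_active * q).toNat with hrdef
  have hnq : ((n : Nat) : Int) * q = num_active * q := by rw [hn]
  have hrn : r ≤ n := by omega
  have harr : pvAIncr L ((List.replicate n q).length + 1) (List.replicate n q) 0
      = List.replicate r (q + 1) ++ List.replicate (n - r) q := by
    have h := pv_loop L q n r hrn (by omega) (by omega) 0 (by omega)
      ((List.replicate n q).length + 1) (by simp)
    simpa using h
  rw [harr]
  have hRr : pvR L num_active = ((r : Nat) : Int) := by
    simp only [pvR, ← hqdef]; omega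
  rw [hRr]
  rw [PySem.List.foldl_append_singleton_eq_map]
  apply List.ext_getElem
  · simp [PySem.List.length_enumerate]
    omega
  · intro i hi1 hi2
    have hin : i < n := by
      simp [PySem.List.length_enumerate] at hi1
      omega
    simp only [List.getElem_map, PySem.List.getElem_enumerate, List.getElem_range, List.nil_append,
      zero_add]
    rw [PySem.List.slice_to_natCast]
    rw [show ((i : Int) + 1) = (((i + 1 : Nat)) : Int) from by push_cast; ring]
    rw [PySem.List.slice_to_natCast]
    rw [pv_sum_take_mix q r n i hrn (by omega), pv_sum_take_mix q r n (i + 1) hrn (by omega)]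

/-- B's single-pass fold in closed form: the guard `i < extra` never fires for i ≥ 0 when
    extra ≤ 0, so the prefix sums are `pvF q (max extra 0)`. -/
lemma pv_B_fold (q extra : Int) (n : Nat) :
    ∀ (cnt j : Nat) (acc : List (Int × Int)) (s : Int), j + cnt = n → s = pvF q (max extra 0) j →
    ((PySem.List.pyRange (j : Int) (n : Int) 1).foldl
      (fun (p : List (Int × Int) × Int) i =>
        (p.1 ++ [(p.2, p.2 + (if i < extra then q + 1 else q) - 1)],
         p.2 + (if i < extra then q + 1 else q))) (acc, s)).1
      = acc ++ (List.range' j cnt).map (fun k => (pvF q (max extra 0) k, pvF q (max extra 0) (k + 1) - 1)) := by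
  intro cnt
  induction cnt with
  | zero =>
    intro j acc s hj hs
    rw [PySem.List.pyRange_one_eq_nil (by omega)]
    simp
  | succ m ih =>
    intro j acc s hj hs
    have hjn : ((j : Nat) : Int) < ((n : Nat) : Int) := by omega
    rw [PySem.List.pyRange_one_cons hjn]
    simp only [List.foldl_cons]
    have hstep : s + (if ((j : Nat) : Int) < extra then q + 1 else q) = pvF q (max extra 0) (j + 1) := by
      have hm : min (((j : Nat) : Int) + 1) (max extra 0)
          = min ((j : Nat) : Int) (max extra 0) + (if ((j : Nat) : Int) < extra then (1 : Int) else 0) := by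
        split_ifs with h' <;> omega
      rw [hs]; simp only [pvF]; push_cast; rw [hm]; split_ifs <;> ring
    rw [hstep]
    rw [show (((j : Nat) : Int) + 1) = (((j + 1 : Nat)) : Int) from by push_cast; ring]
    rw [ih (j + 1) (acc ++ [(s, pvF q (max extra 0) (j + 1) - 1)]) (pvF q (max extra 0) (j + 1)) (by omega) rfl]
    rw [List.range'_succ]
    simp [hs, List.append_assoc]

/-- B's result in the same closed form, for 1 ≤ num_active. -/
lemma pv_B_closed (L : Int) (num_active : Int) (h1 : 1 ≤ num_active) :
    determine_L_vals_alt L num_active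
      = (List.range num_active.toNat).map
          (fun k => (pvF (PySem.Int.truncdiv L num_active) (pvR L num_active) k,
                     pvF (PySem.Int.truncdiv L num_active) (pvR L num_active) (k + 1) - 1)) := by
  simp only [determine_L_vals_alt]
  set q := PySem.Int.truncdiv L num_active with hqdef
  have hmax : max (L - q * num_active) 0 = pvR L num_active := by
    simp only [pvR, ← hqdef, mul_comm]
  have hn : ((num_active.toNat : Nat) : Int) = num_active := Int.toNat_of_nonneg (by omega)
  have h0 : (0 : Int) = pvF q (max (L - q * num_active) 0) 0 := by simp [pvF]
  have hpr : PySem.List.pyRange 0 num_active 1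
      = PySem.List.pyRange (((0 : Nat) : Nat) : Int) (((num_active.toNat : Nat)) : Int) 1 := by
    rw [hn]; norm_num
  rw [hpr]
  rw [pv_B_fold q (L - q * num_active) num_active.toNat num_active.toNat 0 [] 0 (by omega) (by simpa using h0)]
  rw [hmax]
  simp [← List.range_eq_range']

-- ===== VERDICT (by name: the statement is the Claim_ definition above) =====
theorem determine_L_vals_spec : Claim_equal_determine_L_vals := by
  intro L num_active _ hPre
  unfold Spec_determine_L_vals
  rcases hPre with h1 | ⟨h2, h3⟩
  · rw [pv_A_closed L num_active h1, pv_B_closed L num_active h1]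
  · have hA : determine_L_vals L num_active = [] := by
      simp only [determine_L_vals]
      rw [PySem.List.pyRepeat_singleton]
      have hz : num_active.toNat = 0 := by omega
      rw [hz]
      have hloop : pvAIncr L 1 ([] : List Int) 0 = [] := by
        simp only [pvAIncr]
        rw [if_neg (by simp only [List.sum_nil]; omega)]
      simp [hloop, PySem.List.enumerate_nil]
    have hB : determine_L_vals_alt L num_active = [] := by
      simp only [determine_L_vals_alt]
      rw [PySem.List.pyRange_one_eq_nil (by omega)]
      simp
    rw [hA, hB]
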